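-- pv_equiv track=rewrite | github.com/ReneGRomCodes/FCC_daily_coding_challenges | python/05-26/02-05-26 Deepest Brackets.py | get_deepest_brackets
-- ===== SOURCE A (Python) =====
-- def get_deepest_brackets(s: str) -> str:
--     opening_brackets, closing_brackets = {"(", "[", "{"}, {")", "]", "}"}
--     current_depth: int = 0
--     max_depth: int = 0
--     result: str = ""
--
--     for char in s:
--         if char in opening_brackets:
--             current_depth += 1
--             if current_depth > max_depth:
--                 max_depth = current_depth
--                 result = ""
--
--         elif char in closing_brackets:
--             current_depth -= 1
--
--         else:
--             if current_depth == max_depth: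
--                 result += char
--
--     return result
-- ===== SOURCE B (Python) =====
-- def get_deepest_brackets(s: str) -> str:
--     # pass 1: find the maximum nesting depth reached (no clamping of negatives)
--     depth = 0
--     max_depth = 0
--     for char in s:
--         if char in "([{":
--             depth += 1
--             if depth > max_depth:
--                 max_depth = depth
--         elif char in ")]}":
--             depth -= 1
--     # pass 2: collect non-bracket characters at that depth
--     depth = 0
--     out = []
--     for char in s:
--         if char in "([{":
--             depth += 1
--         elif char in ")]}":
--             depth -= 1
--         elif depth == max_depth:
--             out.append(char)
--     return "".join(out)
-- ===== Notes on version B (the rewrite author's own statement) =====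
-- stated objective: simpler
-- what changed: Replaces A's single pass with running-max-and-reset of the result by two plain passes: first compute the maximum depth, then collect non-bracket characters at exactly that depth.
import Mathlib
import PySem

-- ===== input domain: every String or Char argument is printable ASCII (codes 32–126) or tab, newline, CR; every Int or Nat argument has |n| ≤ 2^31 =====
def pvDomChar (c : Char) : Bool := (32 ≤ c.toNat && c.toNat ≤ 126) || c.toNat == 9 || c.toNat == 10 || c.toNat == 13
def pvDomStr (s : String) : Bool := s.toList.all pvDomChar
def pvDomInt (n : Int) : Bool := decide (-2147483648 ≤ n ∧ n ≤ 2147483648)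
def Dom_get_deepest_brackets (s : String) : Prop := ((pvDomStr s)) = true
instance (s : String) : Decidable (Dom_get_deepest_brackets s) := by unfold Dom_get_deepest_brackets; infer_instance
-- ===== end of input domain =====

-- B replaces A's one-pass running-max-with-result-reset by a compute-max-then-filter two-pass structure (simpler).

-- ===== PORT A =====
-- state: (current_depth, max_depth, result)
def pvAStep : (Int × Int × List Char) → Char → (Int × Int × List Char)
  | (d, m, r), c =>
    if c = '(' ∨ c = '[' ∨ c = '{' then
      if d + 1 > m then (d + 1, d + 1, []) else (d + 1, m, r)
    else if c = ')' ∨ c = ']' ∨ c = '}' then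
      (d - 1, m, r)
    else
      if d = m then (d, m, r ++ [c]) else (d, m, r)

def get_deepest_brackets (s : String) : String :=
  String.ofList (s.toList.foldl pvAStep (0, 0, [])).2.2

-- ===== PORT B =====
-- pass 1 state: (depth, max_depth)
def pvBMaxStep : (Int × Int) → Char → (Int × Int)
  | (d, m), c =>
    if c = '(' ∨ c = '[' ∨ c = '{' then
      (d + 1, if d + 1 > m then d + 1 else m)
    else if c = ')' ∨ c = ']' ∨ c = '}' then
      (d - 1, m)
    else
      (d, m)

-- pass 2 state: (depth, out), collecting at depth M
def pvBCollectStep (M : Int) : (Int × List Char) → Char → (Int × List Char)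
  | (d, out), c =>
    if c = '(' ∨ c = '[' ∨ c = '{' then
      (d + 1, out)
    else if c = ')' ∨ c = ']' ∨ c = '}' then
      (d - 1, out)
    else if d = M then
      (d, out ++ [c])
    else
      (d, out)

def get_deepest_brackets_alt (s : String) : String :=
  let M := (s.toList.foldl pvBMaxStep (0, 0)).2
  String.ofList (s.toList.foldl (pvBCollectStep M) (0, [])).2

-- ===== PRECONDITION & SPEC =====
def Spec_get_deepest_brackets (s : String) (out : String) : Prop := out = get_deepest_brackets_alt s
instance (s : String) (out : String) : Decidable (Spec_get_deepest_brackets s out) := by unfold Spec_get_deepest_brackets; infer_instance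

-- ===== CLAIM (what is proved, stated in full; the proofs are below) =====
def Claim_equal_get_deepest_brackets : Prop := ∀ (s : String), Dom_get_deepest_brackets s → Spec_get_deepest_brackets s (get_deepest_brackets s)

-- ===== LEMMAS AND PROOFS =====

-- B's pass-1 max never decreases below its starting value
lemma pvBMax_mono (cs : List Char) : ∀ (d m : Int), m ≤ (cs.foldl pvBMaxStep (d, m)).2 := by
  induction cs with
  | nil => intro d m; simp
  | cons c cs ih =>
    intro d m
    simp only [List.foldl_cons, pvBMaxStep]
    split_ifs with h1 h2 h3
    · exact le_trans (by omega) (ih (d + 1) (d + 1))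
    · exact ih (d + 1) m
    · exact ih (d - 1) m
    · exact ih d m

-- accumulator lemma for B's pass 2
lemma pvBCollect_acc (M : Int) (cs : List Char) : ∀ (d : Int) (acc : List Char),
    (cs.foldl (pvBCollectStep M) (d, acc)).2 = acc ++ (cs.foldl (pvBCollectStep M) (d, [])).2 := by
  induction cs with
  | nil => intro d acc; simp
  | cons c cs ih =>
    intro d acc
    simp only [List.foldl_cons, pvBCollectStep]
    split_ifs with h1 h2 h3
    · exact ih (d + 1) acc
    · exact ih (d - 1) acc
    · rw [ih d (acc ++ [c]), ih d ([] ++ [c])]; simp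
    · exact ih d acc

-- main invariant: A's fold from (d, m, r) with d ≤ m equals (keep r iff the final max is still m) ++ B's collection at the final max
lemma pv_main (cs : List Char) : ∀ (d m : Int) (r : List Char), d ≤ m →
    (cs.foldl pvAStep (d, m, r)).2.2 =
      (if (cs.foldl pvBMaxStep (d, m)).2 = m then r else [])
        ++ (cs.foldl (pvBCollectStep ((cs.foldl pvBMaxStep (d, m)).2)) (d, []) ).2 := by
  induction cs with
  | nil => intro d m r _; simp
  | cons c cs ih =>
    intro d m r hdm
    by_cases h1 : c = '(' ∨ c = '[' ∨ c = '{'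
    · by_cases h2 : d + 1 > m
      · -- opening bracket reaching a new maximum: A resets its result
        simp only [List.foldl_cons, pvAStep, pvBMaxStep, pvBCollectStep, if_pos h1, if_pos h2]
        have hM := pvBMax_mono cs (d + 1) (d + 1)
        have hne : ¬ (cs.foldl pvBMaxStep (d + 1, d + 1)).2 = m := by omega
        rw [ih (d + 1) (d + 1) [] (le_refl _), if_neg hne]
        simp only [ite_self, List.nil_append]
      · -- opening bracket, no new maximum
        simp only [List.foldl_cons, pvAStep, pvBMaxStep, pvBCollectStep, if_pos h1, if_neg h2]
        exact ih (d + 1) m r (by omega)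
    · by_cases h2 : c = ')' ∨ c = ']' ∨ c = '}'
      · -- closing bracket
        simp only [List.foldl_cons, pvAStep, pvBMaxStep, pvBCollectStep, if_neg h1, if_pos h2]
        exact ih (d - 1) m r (by omega)
      · -- ordinary character
        simp only [List.foldl_cons, pvAStep, pvBMaxStep, pvBCollectStep, if_neg h1, if_neg h2]
        have hmono := pvBMax_mono cs d m
        by_cases hMm : (cs.foldl pvBMaxStep (d, m)).2 = m
        · by_cases hdm' : d = m
          · have hdM : d = (cs.foldl pvBMaxStep (d, m)).2 := by omega
            rw [if_pos hdm', if_pos hdM, if_pos hMm, ih d m (r ++ [c]) hdm, if_pos hMm,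
                List.nil_append, pvBCollect_acc _ cs d [c]]
            simp
          · have hdM : ¬ d = (cs.foldl pvBMaxStep (d, m)).2 := by omega
            rw [if_neg hdm', if_neg hdM, if_pos hMm, ih d m r hdm, if_pos hMm]
        · have hdM : ¬ d = (cs.foldl pvBMaxStep (d, m)).2 := by omega
          rw [if_neg hdM, if_neg hMm]
          by_cases hdm' : d = m
          · rw [if_pos hdm', ih d m (r ++ [c]) hdm, if_neg hMm]
          · rw [if_neg hdm', ih d m r hdm, if_neg hMm]

-- ===== VERDICT (by name: the statement is the Claim_ definition above) =====
theorem get_deepest_brackets_spec : Claim_equal_get_deepest_brackets := by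
  intro s _
  unfold Spec_get_deepest_brackets get_deepest_brackets get_deepest_brackets_alt
  rw [pv_main s.toList 0 0 [] (le_refl 0)]
  simp
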